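-- pv_equiv track=rewrite | github.com/TrevisanGMW/gt-tools | gt_tools/utils/namespace_utils.py | get_namespaces
-- ===== SOURCE A (Python) =====
-- def get_namespaces(obj_list):
--     """
--     Get the all namespaces found in provided objects
--     Args:
--         obj_list (list): A list of objects to extract namespaces from
--
--     Returns:
--         A sorted list of namespaces
--     """
--     if isinstance(obj_list, str):  # Convert to list in case a string was provided
--         obj_list = [obj_list]
--     if not obj_list:
--         return []
--
--     namespaces = []
--
--     for node in obj_list:
--         ns_shortname = namespaces_split(node)
--         if ns_shortname[0]:
--             if not namespaces.count(ns_shortname[0]):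
--                 namespaces.append(ns_shortname[0])
--
--     return sorted(namespaces)
--
-- def namespaces_split(object_name):
--     """
--     Extracts namespaces and short name, returns a tuple with this extracted information (namespace, shortname)
--
--     Args:
--         object_name (string): Name of the object
--
--     Returns:
--         Tuple: (namespace, short name)
--     """
--     if not object_name:
--         return None, None
--
--     # Remove full path
--     path = [x for x in object_name.split('|') if x]
--     object_name = path[-1]
--
--     short_name = [x for x in object_name.split(":") if x]
--
--     if not short_name:
--         return "", ""
--     if len(short_name) == 1:
--         return "", short_name[0]
--     else:
--         return ':'.join(short_name[:-1]), short_name[-1]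
-- ===== SOURCE B (Python) =====
-- def get_namespaces(obj_list):
--     """Staged-pass re-implementation: map each object to its namespace prefix,
--     keep the truthy ones (with duplicates), sort once, then dedup by tracking
--     the previously emitted element in one linear pass."""
--     if isinstance(obj_list, str):  # Convert to list in case a string was provided
--         obj_list = [obj_list]
--
--     prefixes = sorted(p for p in map(_namespace_prefix, obj_list) if p)
--
--     out = []
--     prev = None
--     for p in prefixes:
--         if p != prev:
--             out.append(p)
--             prev = p
--     return out
--
--
-- def _namespace_prefix(name):
--     """Namespace part of one object name ('' or None when it has none)."""
--     if not name:
--         return None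
--     leaf = [x for x in name.split('|') if x][-1]
--     parts = [x for x in leaf.split(':') if x]
--     return ':'.join(parts[:-1])
-- ===== Notes on version B (the rewrite author's own statement) =====
-- stated objective: alternative
-- what changed: A dedups while collecting via namespaces.count before each append (a linear scan per node); B maps every object to its namespace prefix with a separate helper, keeps the truthy ones with duplicates, sorts the whole list once and dedups in a single pass comparing each element to the previously emitted one.
import Mathlib
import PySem

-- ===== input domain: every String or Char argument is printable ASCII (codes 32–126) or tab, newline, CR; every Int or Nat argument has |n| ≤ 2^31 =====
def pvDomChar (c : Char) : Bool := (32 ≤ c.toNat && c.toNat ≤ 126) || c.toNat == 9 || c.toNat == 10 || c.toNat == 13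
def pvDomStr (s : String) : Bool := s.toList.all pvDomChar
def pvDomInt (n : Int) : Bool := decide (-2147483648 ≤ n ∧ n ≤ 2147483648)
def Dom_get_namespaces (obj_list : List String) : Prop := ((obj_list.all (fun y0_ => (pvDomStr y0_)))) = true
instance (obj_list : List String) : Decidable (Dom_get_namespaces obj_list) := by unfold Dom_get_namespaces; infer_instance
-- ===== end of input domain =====

-- B maps each object to its namespace prefix with a separate helper, keeps the truthy ones
-- with duplicates, sorts once, then dedups in one pass tracking the previously emitted
-- element, instead of A's count-based dedup during collection (alternative).

-- ===== PORT A =====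
-- Python's namespaces_split, used by A
def namespaces_split (object_name : String) : Option String × Option String :=
  if object_name = "" then (none, none)
  else
    let path := ((PySem.Str.split? object_name "|").getD []).filter (fun x => decide (x ≠ ""))
    match PySem.List.pyGet? path (-1) with
    | none => (none, none)   -- Python raises IndexError here; excluded by Pre_get_namespaces
    | some objName =>
      let short_name := ((PySem.Str.split? objName ":").getD []).filter (fun x => decide (x ≠ ""))
      match short_name with
      | [] => (some "", some "")
      | [s] => (some "", some s)
      | _ => (some (PySem.Str.join ":" (PySem.List.slice short_name none (some (-1)))),
              PySem.List.pyGet? short_name (-1))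

def get_namespaces (obj_list : List String) : List String :=
  if obj_list = [] then []
  else
    let namespaces := obj_list.foldl (fun namespaces node =>
      match (namespaces_split node).1 with
      | none => namespaces                      -- ns_shortname[0] falsy (None)
      | some p =>
        if p = "" then namespaces               -- ns_shortname[0] falsy ("")
        else if PySem.List.count namespaces p = 0 then namespaces ++ [p]
        else namespaces) []
    PySem.List.sorted namespaces (fun x => x) false

-- ===== PORT B =====
-- Python's _namespace_prefix: namespace part of one object name (none ~ Python None)
def namespacePrefix (name : String) : Option String :=
  if name = "" then none
  else
    match (((PySem.Str.split? name "|").getD []).filter (fun x => decide (x ≠ ""))).getLast? with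
    | none => none           -- Python raises IndexError here; excluded by Pre_get_namespaces
    | some leaf =>
      let parts := ((PySem.Str.split? leaf ":").getD []).filter (fun x => decide (x ≠ ""))
      some (PySem.Str.join ":" parts.dropLast)

-- one-pass adjacent dedup: the for-loop with `out`/`prev` state
def dedupAdjacent (xs : List String) : List String :=
  (xs.foldl (fun (st : List String × Option String) p =>
      if st.2 ≠ some p then (st.1 ++ [p], some p) else st)
    ([], none)).1

def get_namespaces_alt (obj_list : List String) : List String :=
  dedupAdjacent
    (PySem.List.sorted
      (obj_list.filterMap (fun n => (namespacePrefix n).filter (fun p => decide (p ≠ ""))))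
      (fun x => x) false)

-- ===== PRECONDITION & SPEC =====
-- Pre_ excludes exactly the inputs on which Python A raises IndexError (path[-1] on an empty
-- path): a non-empty element consisting only of '|' characters.
def Pre_get_namespaces (obj_list : List String) : Prop :=
  (obj_list.all (fun s => s == "" || s.toList.any (fun c => c ≠ '|'))) = true
instance (obj_list : List String) : Decidable (Pre_get_namespaces obj_list) := by
  unfold Pre_get_namespaces; infer_instance
def pvWitness_get_namespaces : List String := ["ns:foo", "a:b:c|x:y", "plain", "ns:bar"]

def Spec_get_namespaces (obj_list : List String) (out : List String) : Prop := out = get_namespaces_alt obj_list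
instance (obj_list : List String) (out : List String) : Decidable (Spec_get_namespaces obj_list out) := by unfold Spec_get_namespaces; infer_instance

-- ===== CLAIM (what is proved, stated in full; the proofs are below) =====
def Claim_equal_get_namespaces : Prop := ∀ (obj_list : List String), Dom_get_namespaces obj_list → Pre_get_namespaces obj_list → Spec_get_namespaces obj_list (get_namespaces obj_list)

-- ===== LEMMAS AND PROOFS =====

-- the (possibly absent) namespace prefix a node contributes in A
def prefOf (node : String) : Option String :=
  match (namespaces_split node).1 with
  | none => none
  | some p => if p = "" then none else some p

theorem prefOf_eq (node : String) :
    prefOf node = (namespacePrefix node).filter (fun p => decide (p ≠ "")) := by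
  unfold prefOf namespaces_split namespacePrefix
  by_cases h0 : node = ""
  · simp [h0]
  · simp only [if_neg h0]
    rw [PySem.List.pyGet?_neg_one]
    cases hlast : (((PySem.Str.split? node "|").getD []).filter
        (fun x => decide (x ≠ ""))).getLast? with
    | none => rfl
    | some leaf =>
      dsimp only
      rcases hsn : ((PySem.Str.split? leaf ":").getD []).filter (fun x => decide (x ≠ "")) with
        _ | ⟨a, _ | ⟨b, t⟩⟩
      · simp [PySem.Str.join, PySem.Chars.join, List.intercalate, Option.filter]
      · simp [PySem.Str.join, PySem.Chars.join, List.intercalate, Option.filter]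
      · rw [PySem.List.slice_to_neg_one]
        simp [Option.filter]

theorem foldl_match_pref (g : List String → String → List String) (obj : List String)
    (acc : List String) :
    obj.foldl (fun acc node =>
      match (namespaces_split node).1 with
      | none => acc
      | some p => if p = "" then acc else g acc p) acc
    = (obj.filterMap prefOf).foldl g acc := by
  induction obj generalizing acc with
  | nil => rfl
  | cons node rest ih =>
    have hbody : (match (namespaces_split node).1 with
        | none => acc
        | some p => if p = "" then acc else g acc p)
        = (match prefOf node with | none => acc | some p => g acc p) := by
      unfold prefOf
      cases (namespaces_split node).1 with
      | none => rfl
      | some p => by_cases hp : p = "" <;> simp [hp]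
    simp only [List.foldl_cons, List.filterMap_cons, hbody]
    cases prefOf node <;> simp [ih]

theorem count_body_eq_set_add (acc : List String) (p : String) :
    (if PySem.List.count acc p = 0 then acc ++ [p] else acc) = PySem.Set.add acc p := by
  by_cases h : p ∈ acc
  · simp [PySem.Set.add, PySem.List.count, List.count_eq_zero, h]
  · simp [PySem.Set.add, PySem.List.count, List.count_eq_zero, h]

-- adjacent dedup, structurally
def adjFrom (p : String) : List String → List String
  | [] => []
  | y :: ys => if y = p then adjFrom p ys else y :: adjFrom y ys

def adj : List String → List String
  | [] => []
  | x :: xs => x :: adjFrom x xs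

theorem dedup_go (s : List String) (acc : List String) (p : String) :
    (s.foldl (fun (st : List String × Option String) q =>
        if st.2 ≠ some q then (st.1 ++ [q], some q) else st) (acc, some p)).1
    = acc ++ adjFrom p s := by
  induction s generalizing acc p with
  | nil => simp [adjFrom]
  | cons y ys ih =>
    rw [List.foldl_cons]
    simp only [adjFrom]
    by_cases h : y = p
    · have hcond : ¬((acc, some p).2 ≠ some y) := by simp [h]
      rw [if_neg hcond, if_pos h]
      exact ih acc p
    · have hcond : (acc, some p).2 ≠ some y := by
        intro hc; exact h (Option.some.inj hc).symm
      rw [if_pos hcond, if_neg h]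
      simpa [List.append_assoc] using ih (acc ++ [y]) y

theorem dedupAdjacent_eq_adj (xs : List String) : dedupAdjacent xs = adj xs := by
  cases xs with
  | nil => rfl
  | cons x s =>
    unfold dedupAdjacent
    have hcond : (([] : List String), (none : Option String)).2 ≠ some x := by simp
    rw [List.foldl_cons, if_pos hcond]
    simpa [adj] using dedup_go s [x] x

theorem mem_adjFrom_of_mem {x : String} {s : List String} (p : String) (hx : x ∈ s) :
    x = p ∨ x ∈ adjFrom p s := by
  induction s generalizing p with
  | nil => cases hx
  | cons y ys ih =>
    rcases List.mem_cons.mp hx with h | h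
    · subst h
      by_cases hyp : x = p
      · exact Or.inl hyp
      · right; simp [adjFrom, hyp]
    · by_cases hyp : y = p
      · subst hyp
        rcases ih y h with h' | h'
        · exact Or.inl h'
        · right; simp [adjFrom, h']
      · rcases ih y h with h' | h'
        · right; simp [adjFrom, hyp, h']
        · right; simp [adjFrom, hyp, h']

theorem mem_adjFrom {x : String} {s : List String} {p : String} (hx : x ∈ adjFrom p s) :
    x ∈ s := by
  induction s generalizing p with
  | nil => cases hx
  | cons y ys ih =>
    by_cases hyp : y = p
    · simp only [adjFrom, if_pos hyp] at hx
      exact List.mem_cons_of_mem _ (ih hx)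
    · simp only [adjFrom, if_neg hyp, List.mem_cons] at hx
      rcases hx with h | h
      · exact h ▸ List.mem_cons_self
      · exact List.mem_cons_of_mem _ (ih h)

theorem mem_adj {x : String} {s : List String} : x ∈ adj s ↔ x ∈ s := by
  cases s with
  | nil => simp [adj]
  | cons y ys =>
    constructor
    · intro h
      rcases List.mem_cons.mp h with h | h
      · exact h ▸ List.mem_cons_self
      · exact List.mem_cons_of_mem _ (mem_adjFrom h)
    · intro h
      rcases List.mem_cons.mp h with h | h
      · exact h ▸ List.mem_cons_self
      · rcases mem_adjFrom_of_mem y h with h' | h'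
        · exact h' ▸ List.mem_cons_self
        · exact List.mem_cons_of_mem _ h'

theorem adjFrom_pairwise_lt {p : String} {s : List String}
    (hs : (p :: s).Pairwise (· ≤ ·)) : (p :: adjFrom p s).Pairwise (· < ·) := by
  induction s generalizing p with
  | nil => simp [adjFrom]
  | cons y ys ih =>
    rcases List.pairwise_cons.mp hs with ⟨hle, hys⟩
    by_cases hyp : y = p
    · subst hyp
      simp only [adjFrom, if_true]
      exact ih (List.pairwise_cons.mpr ⟨fun z hz => hle z (List.mem_cons_of_mem _ hz),
        (List.pairwise_cons.mp hys).2⟩)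
    · have hpy : p < y := lt_of_le_of_ne (hle y List.mem_cons_self) (Ne.symm hyp)
      simp only [adjFrom, if_neg hyp]
      have hrec : (y :: adjFrom y ys).Pairwise (· < ·) := ih hys
      refine List.pairwise_cons.mpr ⟨?_, hrec⟩
      intro z hz
      rcases List.mem_cons.mp hz with h | h
      · exact h ▸ hpy
      · exact lt_trans hpy ((List.pairwise_cons.mp hrec).1 z h)

theorem adj_pairwise_lt {s : List String} (hs : s.Pairwise (· ≤ ·)) :
    (adj s).Pairwise (· < ·) := by
  cases s with
  | nil => simp [adj]
  | cons x xs => exact adjFrom_pairwise_lt hs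

-- the heart: sorted(first-occurrence dedup) = adjacent-dedup(sorted)
theorem sorted_ofList_eq_adj_sorted (L : List String) :
    PySem.List.sorted (PySem.Set.ofList L) (fun x => x) false
      = adj (PySem.List.sorted L (fun x => x) false) := by
  have hpw_le : (PySem.List.sorted L (fun x => x) false).Pairwise (· ≤ ·) := by
    simpa using PySem.List.sorted_pairwise (xs := L) (key := fun x => x)
  have hpw : (adj (PySem.List.sorted L (fun x => x) false)).Pairwise (· < ·) :=
    adj_pairwise_lt hpw_le
  have hnd₁ : (adj (PySem.List.sorted L (fun x => x) false)).Nodup :=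
    hpw.imp (fun h => ne_of_lt h)
  have hnd₂ : (PySem.Set.ofList L).Nodup := PySem.Set.nodup_ofList L
  have hperm : (adj (PySem.List.sorted L (fun x => x) false)).Perm (PySem.Set.ofList L) := by
    rw [List.perm_ext_iff_of_nodup hnd₁ hnd₂]
    intro a
    rw [mem_adj, PySem.List.mem_sorted, PySem.Set.mem_ofList]
  exact PySem.List.sorted_eq_of_perm_of_pairwise_lt _ _ _ hperm hpw

-- ===== VERDICT (by name: the statement is the Claim_ definition above) =====
theorem get_namespaces_spec : Claim_equal_get_namespaces := by
  intro obj_list _ _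
  unfold Spec_get_namespaces get_namespaces get_namespaces_alt
  have hfm : obj_list.filterMap
      (fun n => (namespacePrefix n).filter (fun p => decide (p ≠ ""))) =
      obj_list.filterMap prefOf := by
    apply List.filterMap_congr
    intro n _
    exact (prefOf_eq n).symm
  rw [dedupAdjacent_eq_adj, hfm]
  by_cases hnil : obj_list = []
  · subst hnil; rfl
  · simp only [if_neg hnil]
    rw [foldl_match_pref]
    have hA : (obj_list.filterMap prefOf).foldl
        (fun namespaces p => if PySem.List.count namespaces p = 0 then namespaces ++ [p]
          else namespaces) [] = PySem.Set.ofList (obj_list.filterMap prefOf) := by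
      rw [PySem.Set.ofList_eq_foldl]
      exact PySem.List.foldl_congr_mem _ _ _ _ (fun acc p _ => count_body_eq_set_add acc p)
    rw [hA, sorted_ofList_eq_adj_sorted]
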